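-- pv_equiv track=rewrite | github.com/u-jung/atom-clone | plugins/arPotsdamPlugin/python/geoJSONizer.py | X_get_instance
-- ===== SOURCE A (Python) =====
-- def X_get_instance(instances):
-- 	"""
--
-- 	"""
-- 	lst=[]
-- 	l=instances.split('|')
-- 	for instance in l:
-- 		lst.append(instance[instance.rfind('/')+1:])
--
-- 	if len(list(set(lst).intersection(["Q5"])))>0:
-- 		return "Q5"  #Human
-- 	if len(list(set(lst).intersection(["Q20746389","Q1564373"])))>0:
-- 		return "Q20746389"    # Mission
-- 	if len(list(set(lst).intersection(["Q4830453"])))>0: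
-- 		return "Q4830453"  #Enterprise
-- 	if len(list(set(lst).intersection(["Q327333"])))>0:
-- 		return "Q327333"    # Authority
-- 	if len(list(set(lst).intersection(["Q45295908"])))>0:
-- 		return "Q45295908"    # Military
-- 	if len(list(set(lst).intersection(["Q486972","Q3024240","Q164142"])))>0:
-- 		return "Q486972"    # Human Settlement
-- 	if len(list(set(lst).intersection(["Q15815670"])))>0:
-- 		return "Q15815670"    # Event
-- 	if len(list(set(lst).intersection(["Q133156"])))>0:
-- 		return "Q133156"    # colony
-- 	return ""
-- ===== SOURCE B (Python) =====
-- _RANK = {"Q5": 0, "Q20746389": 1, "Q1564373": 1, "Q4830453": 2, "Q327333": 3,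
--          "Q45295908": 4, "Q486972": 5, "Q3024240": 5, "Q164142": 5,
--          "Q15815670": 6, "Q133156": 7}
-- _REP = ["Q5", "Q20746389", "Q4830453", "Q327333", "Q45295908", "Q486972",
--         "Q15815670", "Q133156"]
--
--
-- def X_get_instance(instances):
--     best = 8
--     for part in instances.split('|'):
--         qid = part[part.rfind('/') + 1:]
--         r = _RANK.get(qid, 8)
--         if r < best:
--             best = r
--     return _REP[best] if best < 8 else ""
-- ===== Notes on version B (the rewrite author's own statement) =====
-- stated objective: simpler
-- what changed: Replaces A's eight ordered set(lst).intersection checks (each materializing a set and an intersection list) by a precedence dict mapping every QID to a rank plus a representative list, computed in one accumulating min-rank pass over the suffixes.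
import Mathlib
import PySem

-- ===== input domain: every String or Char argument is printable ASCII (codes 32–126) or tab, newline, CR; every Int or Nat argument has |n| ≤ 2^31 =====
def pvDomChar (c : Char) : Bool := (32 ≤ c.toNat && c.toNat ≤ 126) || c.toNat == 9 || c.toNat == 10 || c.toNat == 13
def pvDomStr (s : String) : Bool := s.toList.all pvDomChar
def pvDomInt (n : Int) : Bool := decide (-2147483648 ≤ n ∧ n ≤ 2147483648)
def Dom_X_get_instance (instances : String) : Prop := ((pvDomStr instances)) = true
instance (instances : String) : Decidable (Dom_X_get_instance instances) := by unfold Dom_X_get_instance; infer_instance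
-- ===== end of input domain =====

-- B replaces A's eight ordered set-intersection checks by one min-rank pass over a precedence table (objective: simpler).

-- ===== PORT A =====
def X_get_instance (instances : String) : String :=
  let l := (PySem.Str.split? instances "|").getD []   -- sep "|" ≠ "", so split? is always some
  let lst := l.foldl (fun acc inst =>
    acc ++ [PySem.Str.slice inst (some (PySem.Str.rfind inst "/" + 1)) none]) []
  if PySem.Set.len (PySem.Set.inter (PySem.Set.ofList lst) ["Q5"]) > 0 then "Q5"
  else if PySem.Set.len (PySem.Set.inter (PySem.Set.ofList lst) ["Q20746389", "Q1564373"]) > 0 then "Q20746389"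
  else if PySem.Set.len (PySem.Set.inter (PySem.Set.ofList lst) ["Q4830453"]) > 0 then "Q4830453"
  else if PySem.Set.len (PySem.Set.inter (PySem.Set.ofList lst) ["Q327333"]) > 0 then "Q327333"
  else if PySem.Set.len (PySem.Set.inter (PySem.Set.ofList lst) ["Q45295908"]) > 0 then "Q45295908"
  else if PySem.Set.len (PySem.Set.inter (PySem.Set.ofList lst) ["Q486972", "Q3024240", "Q164142"]) > 0 then "Q486972"
  else if PySem.Set.len (PySem.Set.inter (PySem.Set.ofList lst) ["Q15815670"]) > 0 then "Q15815670"
  else if PySem.Set.len (PySem.Set.inter (PySem.Set.ofList lst) ["Q133156"]) > 0 then "Q133156"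
  else ""

-- ===== PORT B =====
def pvRANK : PySem.Dict String Int :=
  PySem.Dict.ofList [("Q5", 0), ("Q20746389", 1), ("Q1564373", 1), ("Q4830453", 2),
    ("Q327333", 3), ("Q45295908", 4), ("Q486972", 5), ("Q3024240", 5), ("Q164142", 5),
    ("Q15815670", 6), ("Q133156", 7)]

def pvREP : List String :=
  ["Q5", "Q20746389", "Q4830453", "Q327333", "Q45295908", "Q486972", "Q15815670", "Q133156"]

def X_get_instance_alt (instances : String) : String :=
  let best := (((PySem.Str.split? instances "|").getD []).foldl (fun best part =>
    let qid := PySem.Str.slice part (some (PySem.Str.rfind part "/" + 1)) none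
    let r := PySem.Dict.getD pvRANK qid 8
    if r < best then r else best) 8)
  if best < 8 then (PySem.List.pyGet? pvREP best).getD "" else ""

-- ===== PRECONDITION & SPEC =====
def Spec_X_get_instance (instances : String) (out : String) : Prop := out = X_get_instance_alt instances
instance (instances : String) (out : String) : Decidable (Spec_X_get_instance instances out) := by unfold Spec_X_get_instance; infer_instance

-- ===== CLAIM (what is proved, stated in full; the proofs are below) =====
def Claim_equal_X_get_instance : Prop := ∀ (instances : String), Dom_X_get_instance instances → Spec_X_get_instance instances (X_get_instance instances)

-- ===== LEMMAS AND PROOFS =====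

def pvRk (x : String) : Int := PySem.Dict.getD pvRANK x 8

-- B's loop value on a list of already-extracted QIDs
def pvBest (lst : List String) : Int :=
  lst.foldl (fun b x => if pvRk x < b then pvRk x else b) 8

-- A's decision cascade expressed as the rank it returns
def pvChain (lst : List String) : Int :=
  if ∃ x ∈ lst, x ∈ (["Q5"] : List String) then 0
  else if ∃ x ∈ lst, x ∈ (["Q20746389", "Q1564373"] : List String) then 1
  else if ∃ x ∈ lst, x ∈ (["Q4830453"] : List String) then 2
  else if ∃ x ∈ lst, x ∈ (["Q327333"] : List String) then 3
  else if ∃ x ∈ lst, x ∈ (["Q45295908"] : List String) then 4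
  else if ∃ x ∈ lst, x ∈ (["Q486972", "Q3024240", "Q164142"] : List String) then 5
  else if ∃ x ∈ lst, x ∈ (["Q15815670"] : List String) then 6
  else if ∃ x ∈ lst, x ∈ (["Q133156"] : List String) then 7
  else 8

lemma pvRk_eq (x : String) :
    pvRk x = if x = "Q5" then 0 else if x = "Q20746389" then 1 else if x = "Q1564373" then 1
      else if x = "Q4830453" then 2 else if x = "Q327333" then 3 else if x = "Q45295908" then 4
      else if x = "Q486972" then 5 else if x = "Q3024240" then 5 else if x = "Q164142" then 5
      else if x = "Q15815670" then 6 else if x = "Q133156" then 7 else 8 := by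
  have h : pvRANK = PySem.Dict.mk [("Q5", 0), ("Q20746389", 1), ("Q1564373", 1), ("Q4830453", 2),
      ("Q327333", 3), ("Q45295908", 4), ("Q486972", 5), ("Q3024240", 5), ("Q164142", 5),
      ("Q15815670", 6), ("Q133156", 7)] := by decide
  simp only [pvRk, PySem.Dict.getD, h, PySem.Dict.get?_mk_cons, beq_iff_eq]
  by_cases h1 : x = "Q5" <;> by_cases h2 : x = "Q20746389" <;> by_cases h3 : x = "Q1564373" <;>
    by_cases h4 : x = "Q4830453" <;> by_cases h5 : x = "Q327333" <;> by_cases h6 : x = "Q45295908" <;>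
    simp_all [eq_comm]
  by_cases h7 : x = "Q486972" <;> by_cases h8 : x = "Q3024240" <;> by_cases h9 : x = "Q164142" <;>
    by_cases h10 : x = "Q15815670" <;> by_cases h11 : x = "Q133156" <;> simp_all [eq_comm, PySem.Dict.get?]

lemma pvFoldl_push (f : String → String) :
    ∀ (l : List String) (acc : List String),
      l.foldl (fun a x => a ++ [f x]) acc = acc ++ l.map f := by
  intro l
  induction l with
  | nil => simp
  | cons x xs ih => intro acc; simp [ih]

lemma pvFoldl_min_gen : ∀ (lst : List String) (a b : Int),
    lst.foldl (fun m x => if pvRk x < m then pvRk x else m) (min a b) =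
      min a (lst.foldl (fun m x => if pvRk x < m then pvRk x else m) b) := by
  intro lst
  induction lst with
  | nil => intro a b; simp
  | cons x xs ih =>
    intro a b
    have h : (if pvRk x < min a b then pvRk x else min a b) = min a (if pvRk x < b then pvRk x else b) := by
      rcases le_total a b with h' | h' <;> simp [min_def] <;> split_ifs <;> omega
    simp only [List.foldl_cons, h, ih]

lemma pvBest_cons (x : String) (xs : List String) :
    pvBest (x :: xs) = min (pvRk x) (pvBest xs) := by
  unfold pvBest
  have h : (if pvRk x < 8 then pvRk x else 8) = min (pvRk x) 8 := by
    rcases le_total (pvRk x) 8 with h' | h' <;> simp [min_def] <;> split_ifs <;> omega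
  simp only [List.foldl_cons, h, pvFoldl_min_gen]

set_option maxHeartbeats 4000000 in
lemma pvBest_eq_pvChain : ∀ lst : List String, pvBest lst = pvChain lst := by
  intro lst
  induction lst with
  | nil => simp [pvBest, pvChain]
  | cons x xs ih =>
    rw [pvBest_cons, ih, pvRk_eq]
    clear ih
    unfold pvChain
    by_cases h1 : x = "Q5" <;>
      [skip; by_cases h2 : x = "Q20746389" <;>
        [skip; by_cases h3 : x = "Q1564373" <;>
          [skip; by_cases h4 : x = "Q4830453" <;>
            [skip; by_cases h5 : x = "Q327333" <;>
              [skip; by_cases h6 : x = "Q45295908" <;>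
                [skip; by_cases h7 : x = "Q486972" <;>
                  [skip; by_cases h8 : x = "Q3024240" <;>
                    [skip; by_cases h9 : x = "Q164142" <;>
                      [skip; by_cases h10 : x = "Q15815670" <;>
                        [skip; by_cases h11 : x = "Q133156"]]]]]]]]]] <;>
      simp_all <;> split_ifs <;> first | omega | tauto

lemma pvInter_pos (lst cs : List String) :
    PySem.Set.len (PySem.Set.inter (PySem.Set.ofList lst) cs) > 0 ↔ ∃ x ∈ lst, x ∈ cs := by
  have h1 : PySem.Set.len (PySem.Set.inter (PySem.Set.ofList lst) cs) > 0 ↔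
      ∃ x, x ∈ PySem.Set.inter (PySem.Set.ofList lst) cs := by
    simp only [PySem.Set.len, gt_iff_lt, Int.natCast_pos]
    exact List.length_pos_iff_exists_mem
  rw [h1]
  constructor
  · rintro ⟨x, hx⟩
    rw [PySem.Set.mem_inter, PySem.Set.mem_ofList] at hx
    exact ⟨x, hx.1, hx.2⟩
  · rintro ⟨x, hx, hc⟩
    exact ⟨x, by rw [PySem.Set.mem_inter, PySem.Set.mem_ofList]; exact ⟨hx, hc⟩⟩

-- ===== VERDICT (by name: the statement is the Claim_ definition above) =====
set_option maxHeartbeats 1000000 in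
theorem X_get_instance_spec : Claim_equal_X_get_instance := by
  intro instances _
  unfold Spec_X_get_instance
  show X_get_instance instances = X_get_instance_alt instances
  simp only [X_get_instance, X_get_instance_alt]
  generalize (PySem.Str.split? instances "|").getD [] = l
  rw [pvFoldl_push (fun s => PySem.Str.slice s (some (PySem.Str.rfind s "/" + 1)) none) l []]
  have hfold : (l.foldl (fun best part =>
      if PySem.Dict.getD pvRANK (PySem.Str.slice part (some (PySem.Str.rfind part "/" + 1)) none) 8 < best
      then PySem.Dict.getD pvRANK (PySem.Str.slice part (some (PySem.Str.rfind part "/" + 1)) none) 8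
      else best) 8) =
      pvBest (l.map (fun s => PySem.Str.slice s (some (PySem.Str.rfind s "/" + 1)) none)) := by
    unfold pvBest
    rw [List.foldl_map]
    rfl
  rw [hfold, pvBest_eq_pvChain]
  simp only [List.nil_append, pvInter_pos]
  unfold pvChain
  split_ifs <;> first | decide | (exfalso; omega)
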